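-- pv_equiv track=rewrite | github.com/matuspintek-boop/ib111 | 10/p6_circle.py | hex_circle
-- ===== SOURCE A (Python) =====
-- first = int
--
-- last = int
--
-- num = int
--
-- Data = dict[first, list[tuple[last, num]]]
--
-- def get_first_last_dig(number: num) -> tuple[first, last, num]:
--     number_copy = number
--     last_d: last = number % 16
--     first_d: first = -1
--     while number > 0:
--         first_d = number % 16
--         number //= 16
--
--     if first_d == -1:
--         first_d = last_d
--     return (first_d, last_d, number_copy)
--
-- def dfs_indexator(number: num, length: int,
--                   data_set: set[tuple[num, int]]) -> tuple[bool, int]: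
--     output = False
--     index = 0
--     for i in range(length+1):
--         if (number, i) in data_set:
--             output = True
--             index = i
--     return (output, index)
--
-- def find_circle(already_visited: set[tuple[num, int]], current_length: int,
--                 current_num_first: int, data: Data, record: list[int]) -> None:
--
--     for (last_digit, number) in data.get(current_num_first, []):
--
--         num_in_set, gen = dfs_indexator(number,
--                                         current_length, already_visited)
--
--         if not num_in_set:
--             find_circle(already_visited | {(number, current_length)},
--                         current_length+1, last_digit, data, record)
--
--         else:
--             record.append(current_length - gen)
--
-- def maximum(list_: list[int]) -> int:
--     max_val: int = 0
--     for val in list_: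
--         max_val = max(val, max_val)
--
--     return max_val
--
-- def hex_circle(numbers: set[int]) -> int:
--     data: Data = {}
--     for number in numbers:
--         first_d, last_d, number = get_first_last_dig(number)
--         if not data.get(first_d, False):
--             data[first_d] = [(last_d, number)]
--         else:
--             data[first_d].append((last_d, number))
--
--     record: list[int] = []
--
--     for key in data.keys():
--         find_circle(set(), 0, key, data, record)
--
--     return maximum(record)
-- ===== SOURCE B (Python) =====
-- def hex_circle(numbers):
--     # B: same digit-graph build, but the cycle search is an explicit stack-based DFS
--     # with a number->depth mapping per path instead of A's recursive search over a
--     # set of (number, depth) pairs scanned by index; the maximum is kept online.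
--     data = {}
--     for n in numbers:
--         if n <= 0:
--             first = last = n % 16
--         else:
--             last = n % 16
--             m = n
--             while m >= 16:
--                 m //= 16
--             first = m
--         data.setdefault(first, []).append((last, n))
--
--     best = 0
--     stack = [(key, {}, 0) for key in data]
--     while stack:
--         first, seen, depth = stack.pop()
--         for last_digit, number in data.get(first, []):
--             if number in seen:
--                 if depth - seen[number] > best:
--                     best = depth - seen[number]
--             else:
--                 child = dict(seen)
--                 child[number] = depth
--                 stack.append((last_digit, child, depth + 1))
--     return best
-- ===== Notes on version B (the rewrite author's own statement) =====
-- stated objective: alternative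
-- what changed: The recursive find_circle over an immutable set of (number, depth) pairs (re-scanned index by index via dfs_indexator) is replaced by an explicit stack-based DFS whose entries carry a number->depth dictionary, recording cycle lengths into a running maximum instead of a record list passed through the recursion.
import Mathlib
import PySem

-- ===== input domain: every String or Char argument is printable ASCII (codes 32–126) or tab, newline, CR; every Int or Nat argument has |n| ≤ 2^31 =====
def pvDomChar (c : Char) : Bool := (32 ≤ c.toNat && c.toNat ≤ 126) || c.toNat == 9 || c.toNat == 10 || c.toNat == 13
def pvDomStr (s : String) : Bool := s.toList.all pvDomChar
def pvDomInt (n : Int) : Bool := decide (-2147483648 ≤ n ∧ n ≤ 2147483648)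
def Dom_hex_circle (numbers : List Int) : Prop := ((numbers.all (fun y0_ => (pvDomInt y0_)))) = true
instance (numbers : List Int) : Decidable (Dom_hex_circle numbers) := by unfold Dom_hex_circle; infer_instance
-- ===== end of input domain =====

-- B replaces A's recursive set-of-pairs DFS by an explicit stack-based DFS with a
-- number→depth dictionary and a running maximum (objective: alternative, same cost class).

-- ===== PORT A =====
-- while number > 0: first_d = number % 16; number //= 16
def gfl_loop (number : Int) (first_d : Int) : Int :=
  if _h : 0 < number then gfl_loop (PySem.Int.floordiv number 16) (PySem.Int.mod number 16)
  else first_d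
termination_by number.toNat
decreasing_by
  rw [PySem.Int.floordiv_eq_ediv_of_pos (by norm_num : (0:Int) < 16)]
  omega

def get_first_last_dig (number : Int) : Int × Int × Int :=
  let number_copy := number
  let last_d : Int := PySem.Int.mod number 16
  let first_d : Int := gfl_loop number (-1)
  let first_d2 : Int := if first_d = -1 then last_d else first_d
  (first_d2, last_d, number_copy)

def dfs_indexator (number : Int) (length : Int) (data_set : PySem.Set (Int × Int)) : Bool × Int :=
  (PySem.List.pyRange 0 (length + 1) 1).foldl
    (fun st i => if data_set.contains (number, i) then (true, i) else st)
    (false, 0)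

-- termination-measure helpers for find_circle (cited by its decreasing_by)
def pvMarked (visited : PySem.Set (Int × Int)) (len : Int) (n : Int) : Bool :=
  visited.any (fun p => p.1 == n && decide (0 ≤ p.2) && decide (p.2 ≤ len))

def pvNums (data : PySem.Dict Int (List (Int × Int))) : Finset Int :=
  (data.values.flatten.map Prod.snd).toFinset

def pvU (data : PySem.Dict Int (List (Int × Int))) (pending : List (Int × Int))
    (visited : PySem.Set (Int × Int)) (len : Int) : Nat :=
  ((pvNums data ∪ (pending.map Prod.snd).toFinset).filter
    (fun n => pvMarked visited len n = false)).card

theorem pv_values_of_get? {d : PySem.Dict Int (List (Int × Int))} {k : Int}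
    {v : List (Int × Int)} (h : d.get? k = some v) : v ∈ d.values := by
  unfold PySem.Dict.get? at h
  cases hf : List.find? (fun p => p.1 == k) d.items with
  | none => rw [hf] at h; simp at h
  | some p =>
    rw [hf] at h
    simp only [Option.map_some, Option.some.injEq] at h
    simp only [PySem.Dict.values, List.mem_map]
    exact ⟨p, List.mem_of_find?_eq_some hf, h⟩

theorem pvNums_getD {data : PySem.Dict Int (List (Int × Int))} {k : Int}
    {e : Int × Int} (h : e ∈ data.getD k []) : e.2 ∈ pvNums data := by
  unfold PySem.Dict.getD at h
  cases hq : data.get? k with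
  | none => rw [hq] at h; simp at h
  | some v =>
    rw [hq] at h
    simp only [Option.getD_some] at h
    have hv := pv_values_of_get? hq
    simp only [pvNums, List.mem_toFinset, List.mem_map]
    exact ⟨e, List.mem_flatten.mpr ⟨v, hv, h⟩, rfl⟩

theorem pvMarked_mono {visited : PySem.Set (Int × Int)} {len len' n : Int}
    (q : Int × Int) (hl : len ≤ len')
    (h : pvMarked visited len n = true) :
    pvMarked (PySem.Set.union visited [q]) len' n = true := by
  simp only [pvMarked, List.any_eq_true] at h ⊢
  obtain ⟨p, hp, hpred⟩ := h
  simp only [Bool.and_eq_true, beq_iff_eq, decide_eq_true_eq] at hpred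
  refine ⟨p, ?_, ?_⟩
  · show p ∈ PySem.Set.union visited [q]
    simp only [PySem.Set.union, PySem.Set.update, List.foldl_cons, List.foldl_nil, PySem.Set.add]
    split
    · exact hp
    · exact List.mem_append_left _ hp
  · simp only [Bool.and_eq_true, beq_iff_eq, decide_eq_true_eq]
    exact ⟨⟨hpred.1.1, hpred.1.2⟩, by omega⟩

theorem dfs_any (n len : Int) (s : PySem.Set (Int × Int)) :
    (dfs_indexator n len s).1 = (PySem.List.pyRange 0 (len + 1) 1).any (fun i => s.contains (n, i)) := by
  unfold dfs_indexator
  have hstep : (fun (st : Bool × Int) (i : Int) => if s.contains (n, i) then ((true : Bool), i) else st)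
      = (fun st i => (if s.contains (n, i) then true else st.1,
                      if s.contains (n, i) then i else st.2)) := by
    funext st i
    cases h : s.contains (n, i)
    · simp only [Bool.false_eq_true, if_false]
    · simp only [if_true]
  rw [hstep]
  rw [PySem.List.foldl_prod_mk (f := fun b i => if s.contains (n, i) then true else b)
      (g := fun x i => if s.contains (n, i) then i else x)]
  rw [show ((List.foldl (fun b i => if s.contains (n, i) then true else b) false
      (PySem.List.pyRange 0 (len + 1) 1)),
      (List.foldl (fun x i => if s.contains (n, i) then i else x) 0
      (PySem.List.pyRange 0 (len + 1) 1))).1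
    = List.foldl (fun b i => if s.contains (n, i) then true else b) false
      (PySem.List.pyRange 0 (len + 1) 1) from rfl]
  rw [PySem.List.foldl_if_true_eq (fun i => s.contains (n, i))]
  simp

theorem pv_not_marked_of_dfs_false {n len : Int} {visited : PySem.Set (Int × Int)}
    (h : (dfs_indexator n len visited).1 = false) : pvMarked visited len n = false := by
  rw [dfs_any] at h
  cases hm : pvMarked visited len n with
  | false => rfl
  | true =>
    exfalso
    simp only [pvMarked, List.any_eq_true] at hm
    obtain ⟨p, hp, hpred⟩ := hm
    simp only [Bool.and_eq_true, beq_iff_eq, decide_eq_true_eq] at hpred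
    have hpe : p = (n, p.2) := by
      have := hpred.1.1; exact Prod.ext this rfl
    have hcont : visited.contains (n, p.2) = true := by
      show List.contains visited (n, p.2) = true
      exact List.contains_iff_mem.mpr (hpe ▸ hp)
    have hmem : p.2 ∈ PySem.List.pyRange 0 (len + 1) 1 := by
      rw [PySem.List.mem_pyRange_one]
      omega
    simp only [List.any_eq_false] at h
    exact h _ hmem hcont

theorem pv_marked_self {visited : PySem.Set (Int × Int)} {n len : Int} (h0 : 0 ≤ len) :
    pvMarked (PySem.Set.union visited [(n, len)]) (len + 1) n = true := by
  simp only [pvMarked, List.any_eq_true]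
  refine ⟨(n, len), ?_, ?_⟩
  · show (n, len) ∈ PySem.Set.union visited [(n, len)]
    simp only [PySem.Set.union, PySem.Set.update, List.foldl_cons, List.foldl_nil, PySem.Set.add]
    split
    · next hcont => exact List.contains_iff_mem.mp hcont
    · exact List.mem_append_right _ (by simp)
  · simp only [Bool.and_eq_true, beq_iff_eq, decide_eq_true_eq]
    exact ⟨⟨by trivial, h0⟩, by omega⟩

theorem pvU_mono_rest (data : PySem.Dict Int (List (Int × Int))) (e : Int × Int)
    (rest : List (Int × Int)) (visited : PySem.Set (Int × Int)) (len : Int) :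
    pvU data rest visited len ≤ pvU data (e :: rest) visited len := by
  apply Finset.card_le_card
  intro x hx
  simp only [Finset.mem_filter, Finset.mem_union, List.map_cons, List.toFinset_cons,
    Finset.mem_insert] at hx ⊢
  tauto

theorem pvU_child_subset (data : PySem.Dict Int (List (Int × Int))) (ld n : Int)
    (rest : List (Int × Int)) (visited : PySem.Set (Int × Int)) (len : Int) :
    ((pvNums data ∪ ((data.getD ld []).map Prod.snd).toFinset).filter
        (fun x => pvMarked (PySem.Set.union visited [(n, len)]) (len + 1) x = false)) ⊆
      ((pvNums data ∪ (((ld, n) :: rest).map Prod.snd).toFinset).filter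
        (fun x => pvMarked visited len x = false)) := by
  intro x hx
  simp only [Finset.mem_filter, Finset.mem_union, List.mem_toFinset, List.mem_map] at hx ⊢
  obtain ⟨hu, hm⟩ := hx
  refine ⟨?_, ?_⟩
  · left
    rcases hu with h | h
    · exact h
    · obtain ⟨e, he, rfl⟩ := h
      exact pvNums_getD (data := data) (k := ld) he
  · cases hmm : pvMarked visited len x with
    | false => rfl
    | true =>
      exfalso
      have := pvMarked_mono (q := (n, len)) (len' := len + 1) (n := x) (visited := visited)
        (by omega) hmm
      rw [this] at hm; cases hm

theorem pvU_child_le (data : PySem.Dict Int (List (Int × Int))) (ld n : Int)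
    (rest : List (Int × Int)) (visited : PySem.Set (Int × Int)) (len : Int) :
    pvU data (data.getD ld []) (PySem.Set.union visited [(n, len)]) (len + 1) ≤
      pvU data ((ld, n) :: rest) visited len := by
  exact Finset.card_le_card (pvU_child_subset data ld n rest visited len)

theorem pvU_child_lt (data : PySem.Dict Int (List (Int × Int))) (ld n : Int)
    (rest : List (Int × Int)) (visited : PySem.Set (Int × Int)) (len : Int)
    (h0 : 0 ≤ len) (hdfs : (dfs_indexator n len visited).1 = false) :
    pvU data (data.getD ld []) (PySem.Set.union visited [(n, len)]) (len + 1) <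
      pvU data ((ld, n) :: rest) visited len := by
  apply Finset.card_lt_card
  rw [Finset.ssubset_iff_of_subset (pvU_child_subset data ld n rest visited len)]
  refine ⟨n, ?_, ?_⟩
  · simp only [Finset.mem_filter, Finset.mem_union, List.mem_toFinset, List.mem_map]
    refine ⟨Or.inr ⟨(ld, n), by simp, rfl⟩, pv_not_marked_of_dfs_false hdfs⟩
  · simp only [Finset.mem_filter, not_and]
    intro _
    rw [pv_marked_self h0]
    simp

def find_circle (visited : PySem.Set (Int × Int)) (current_length : Int)
    (data : PySem.Dict Int (List (Int × Int))) (pending : List (Int × Int))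
    (record : List Int) : List Int :=
  match pending with
  | [] => record
  | (last_digit, number) :: rest =>
    match hr : dfs_indexator number current_length visited with
    | (num_in_set, gen) =>
      if hb : num_in_set = false then
        find_circle visited current_length data rest
          (find_circle (PySem.Set.union visited [(number, current_length)]) (current_length + 1)
            data (data.getD last_digit []) record)
      else
        find_circle visited current_length data rest (record ++ [current_length - gen])
termination_by (pvU data pending visited current_length, (-current_length).toNat, pending.length)
decreasing_by
  · -- child call
    have hdfs : (dfs_indexator number current_length visited).1 = false := by
      rw [hr]; simpa using hb
    rcases (by omega : 0 ≤ current_length ∨ current_length < 0) with h0 | h0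
    · exact Prod.Lex.left _ _ (pvU_child_lt data last_digit number rest visited current_length h0 hdfs)
    · have hle := pvU_child_le data last_digit number rest visited current_length
      rcases lt_or_eq_of_le hle with hlt | heq
      · exact Prod.Lex.left _ _ hlt
      · rw [heq]
        exact Prod.Lex.right _ (Prod.Lex.left _ _ (by omega))
  · -- continue with rest after child
    have hle := pvU_mono_rest data (last_digit, number) rest visited current_length
    rcases lt_or_eq_of_le hle with hlt | heq
    · exact Prod.Lex.left _ _ hlt
    · rw [heq]
      exact Prod.Lex.right _ (Prod.Lex.right _ (by simp only [List.length_cons]; omega))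
  · -- continue with rest, found case
    have hle := pvU_mono_rest data (last_digit, number) rest visited current_length
    rcases lt_or_eq_of_le hle with hlt | heq
    · exact Prod.Lex.left _ _ hlt
    · rw [heq]
      exact Prod.Lex.right _ (Prod.Lex.right _ (by simp only [List.length_cons]; omega))

def maximum (list_ : List Int) : Int :=
  list_.foldl (fun max_val val => max val max_val) 0

def hex_circle (numbers : List Int) : Int :=
  let data := numbers.foldl (fun data number =>
    let t := get_first_last_dig number
    if (data.getD t.1 []).isEmpty then data.insert t.1 [(t.2.1, t.2.2)]
    else data.insert t.1 (data.getD t.1 [] ++ [(t.2.1, t.2.2)])) PySem.Dict.empty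
  let record := data.keys.foldl
    (fun record key => find_circle PySem.Set.empty 0 data (data.getD key []) record) []
  maximum record

-- ===== PORT B =====
-- while m >= 16: m //= 16
def hc_msd (m : Int) : Int :=
  if _h : 16 ≤ m then hc_msd (PySem.Int.floordiv m 16) else m
termination_by m.toNat
decreasing_by
  rw [PySem.Int.floordiv_eq_ediv_of_pos (by norm_num : (0:Int) < 16)]
  omega

def hc_digits (n : Int) : Int × Int :=
  if n ≤ 0 then (PySem.Int.mod n 16, PySem.Int.mod n 16)
  else (hc_msd n, PySem.Int.mod n 16)

def hc_build (numbers : List Int) : PySem.Dict Int (List (Int × Int)) :=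
  numbers.foldl (fun d n =>
    d.modify (hc_digits n).1 [] (fun l => l ++ [((hc_digits n).2, n)])) PySem.Dict.empty

-- one pass of the while-loop body: fold over the neighbors, pushing unseen states
-- (top of stack = head of list) and keeping the running maximum
def hc_scan (seen : PySem.Dict Int Int) (depth : Int) (neigh : List (Int × Int))
    (st0 : List (Int × PySem.Dict Int Int × Int) × Int) :
    List (Int × PySem.Dict Int Int × Int) × Int :=
  neigh.foldl (fun st e =>
    (if seen.contains e.2 then st.1 else (e.1, seen.insert e.2 depth, depth + 1) :: st.1,
     if seen.contains e.2 then
       (if st.2 < depth - seen.getD e.2 0 then depth - seen.getD e.2 0 else st.2)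
     else st.2)) st0

-- termination-measure helpers for hc_loop (cited by its decreasing_by)
def pvL (data : PySem.Dict Int (List (Int × Int))) : Nat :=
  (data.values.map List.length).foldr max 0

def pvMu (data : PySem.Dict Int (List (Int × Int))) (seen : PySem.Dict Int Int) : Nat :=
  ((pvNums data).filter (fun n => seen.contains n = false)).card

def pvM (data : PySem.Dict Int (List (Int × Int)))
    (stack : List (Int × PySem.Dict Int Int × Int)) : Nat :=
  (stack.map (fun e => (pvL data + 1) ^ (pvMu data e.2.1))).sum

theorem pv_foldl_cons {α β : Type} (l : List α) (g : α → β) (acc : List β) :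
    l.foldl (fun acc x => g x :: acc) acc = (l.map g).reverse ++ acc := by
  induction l generalizing acc <;> simp_all

theorem hc_scan_fst (seen : PySem.Dict Int Int) (depth : Int) (neigh : List (Int × Int))
    (st : List (Int × PySem.Dict Int Int × Int)) (b : Int) :
    (hc_scan seen depth neigh (st, b)).1 =
      ((neigh.filter (fun e => !seen.contains e.2)).map
        (fun e => (e.1, seen.insert e.2 depth, depth + 1))).reverse ++ st := by
  unfold hc_scan
  rw [PySem.List.foldl_prod_mk
    (f := fun s1 (e : Int × Int) => if seen.contains e.2 then s1
      else (e.1, seen.insert e.2 depth, depth + 1) :: s1)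
    (g := fun b2 (e : Int × Int) => if seen.contains e.2 then
      (if b2 < depth - seen.getD e.2 0 then depth - seen.getD e.2 0 else b2) else b2)]
  show List.foldl _ st neigh = _
  have hswap : (fun s1 (e : Int × Int) => if seen.contains e.2 then s1
      else (e.1, seen.insert e.2 depth, depth + 1) :: s1)
      = (fun s1 (e : Int × Int) => if (!seen.contains e.2) then
          (e.1, seen.insert e.2 depth, depth + 1) :: s1 else s1) := by
    funext s1 e; by_cases h : seen.contains e.2 <;> simp [h]
  rw [hswap]
  rw [PySem.List.foldl_if_eq_foldl_filter (p := fun e : Int × Int => !seen.contains e.2)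
    (f := fun acc (e : Int × Int) => (e.1, seen.insert e.2 depth, depth + 1) :: acc)]
  exact pv_foldl_cons _ _ _

theorem pv_le_foldr_max (l : List Nat) (x : Nat) (h : x ∈ l) : x ≤ l.foldr max 0 := by
  induction l with
  | nil => cases h
  | cons y t ih =>
    rcases List.mem_cons.mp h with rfl | hm
    · exact le_max_left _ _
    · exact le_trans (ih hm) (le_max_right _ _)

theorem pv_len_getD_le (data : PySem.Dict Int (List (Int × Int))) (k : Int) :
    (data.getD k []).length ≤ pvL data := by
  unfold PySem.Dict.getD
  cases hq : data.get? k with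
  | none => simp
  | some v =>
    have hv := pv_values_of_get? hq
    have hmem : v.length ∈ data.values.map List.length := List.mem_map_of_mem hv
    simpa [pvL] using pv_le_foldr_max _ _ hmem

theorem pvMu_insert_lt (data : PySem.Dict Int (List (Int × Int))) (seen : PySem.Dict Int Int)
    {n : Int} (d : Int) (hn : n ∈ pvNums data) (hc : seen.contains n = false) :
    pvMu data (seen.insert n d) < pvMu data seen := by
  unfold pvMu
  apply Finset.card_lt_card
  have hsub : ((pvNums data).filter (fun x => (seen.insert n d).contains x = false)) ⊆
      ((pvNums data).filter (fun x => seen.contains x = false)) := by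
    intro x hx
    simp only [Finset.mem_filter] at hx ⊢
    refine ⟨hx.1, ?_⟩
    have h2 := hx.2
    rw [PySem.Dict.contains_insert] at h2
    simp only [Bool.or_eq_false_iff] at h2
    exact h2.2
  rw [Finset.ssubset_iff_of_subset hsub]
  refine ⟨n, by simp only [Finset.mem_filter]; exact ⟨hn, hc⟩, ?_⟩
  simp only [Finset.mem_filter, not_and]
  intro _
  rw [PySem.Dict.contains_insert]
  simp

theorem pvM_scan_lt (data : PySem.Dict Int (List (Int × Int))) (first : Int)
    (seen : PySem.Dict Int Int) (depth : Int)
    (rest : List (Int × PySem.Dict Int Int × Int)) (best : Int) :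
    pvM data (hc_scan seen depth (data.getD first []) (rest, best)).1 <
      pvM data ((first, seen, depth) :: rest) := by
  rw [hc_scan_fst]
  unfold pvM
  rw [List.map_append, List.sum_append, List.map_reverse, List.sum_reverse, List.map_map]
  simp only [List.map_cons, List.sum_cons]
  have hkey : (((data.getD first []).filter (fun e => !seen.contains e.2)).map
      ((fun e : Int × PySem.Dict Int Int × Int => (pvL data + 1) ^ pvMu data e.2.1) ∘
        (fun e : Int × Int => (e.1, seen.insert e.2 depth, depth + 1)))).sum <
      (pvL data + 1) ^ pvMu data seen := by
    simp only [Function.comp_def]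
    by_cases hP : (data.getD first []).filter (fun e => !seen.contains e.2) = []
    · rw [hP]
      simp only [List.map_nil, List.sum_nil]
      exact Nat.pow_pos (by omega)
    · obtain ⟨e0, he0⟩ := List.exists_mem_of_ne_nil _ hP
      have he0' : e0 ∈ data.getD first [] := List.mem_of_mem_filter he0
      have hc0 : seen.contains e0.2 = false := by
        have := List.of_mem_filter he0; simpa using this
      have hmu1 : 1 ≤ pvMu data seen := by
        have := pvMu_insert_lt data seen depth (pvNums_getD he0') hc0
        omega
      have hEach : ∀ x ∈ ((data.getD first []).filter (fun e => !seen.contains e.2)).map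
          (fun e : Int × Int => (pvL data + 1) ^ pvMu data (seen.insert e.2 depth)),
          x ≤ (pvL data + 1) ^ (pvMu data seen - 1) := by
        intro x hx
        obtain ⟨e, he, rfl⟩ := List.mem_map.mp hx
        have hlt := pvMu_insert_lt data seen depth
          (pvNums_getD (List.mem_of_mem_filter he))
          (by have := List.of_mem_filter he; simpa using this)
        exact Nat.pow_le_pow_right (by omega) (by omega)
      have hsum := List.sum_le_card_nsmul _ _ hEach
      rw [List.length_map, smul_eq_mul] at hsum
      have hlen : ((data.getD first []).filter (fun e => !seen.contains e.2)).length ≤ pvL data :=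
        le_trans (List.length_filter_le _ _) (pv_len_getD_le data first)
      have hBpos : 0 < (pvL data + 1) ^ (pvMu data seen - 1) := Nat.pow_pos (by omega)
      have hmul : ((data.getD first []).filter (fun e => !seen.contains e.2)).length *
          (pvL data + 1) ^ (pvMu data seen - 1) <
          (pvL data + 1) * (pvL data + 1) ^ (pvMu data seen - 1) := by
        apply Nat.mul_lt_mul_of_lt_of_le (by omega) le_rfl hBpos
      have hpow : (pvL data + 1) * (pvL data + 1) ^ (pvMu data seen - 1) =
          (pvL data + 1) ^ pvMu data seen := by
        rw [← pow_succ']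
        congr 1
        omega
      omega
  omega

def hc_loop (data : PySem.Dict Int (List (Int × Int)))
    (stack : List (Int × PySem.Dict Int Int × Int)) (best : Int) : Int :=
  match stack with
  | [] => best
  | (first, seen, depth) :: rest =>
    hc_loop data (hc_scan seen depth (data.getD first []) (rest, best)).1
      (hc_scan seen depth (data.getD first []) (rest, best)).2
termination_by pvM data stack
decreasing_by
  exact pvM_scan_lt data first seen depth rest best

def hex_circle_alt (numbers : List Int) : Int :=
  let data := hc_build numbers
  hc_loop data
    ((data.keys.map (fun k => (k, (PySem.Dict.empty : PySem.Dict Int Int), (0 : Int)))).reverse) 0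

-- ===== PRECONDITION & SPEC =====
def Spec_hex_circle (numbers : List Int) (out : Int) : Prop := out = hex_circle_alt numbers
instance (numbers : List Int) (out : Int) : Decidable (Spec_hex_circle numbers out) := by
  unfold Spec_hex_circle; infer_instance

-- ===== CLAIM (what is proved, stated in full; the proofs are below) =====
def Claim_equal_hex_circle : Prop :=
  ∀ (numbers : List Int), Dom_hex_circle numbers → Spec_hex_circle numbers (hex_circle numbers)

-- ===== LEMMAS AND PROOFS =====

-- unfolding equations
theorem find_nil (v : PySem.Set (Int × Int)) (len : Int) (data : PySem.Dict Int (List (Int × Int)))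
    (r : List Int) : find_circle v len data [] r = r := by
  rw [find_circle]

theorem find_cons_false (v : PySem.Set (Int × Int)) (len : Int)
    (data : PySem.Dict Int (List (Int × Int))) (ld n : Int) (rest : List (Int × Int))
    (r : List Int) (h : (dfs_indexator n len v).1 = false) :
    find_circle v len data ((ld, n) :: rest) r =
      find_circle v len data rest
        (find_circle (PySem.Set.union v [(n, len)]) (len + 1) data (data.getD ld []) r) := by
  conv_lhs => rw [find_circle]
  split
  next a b heq =>
    have ha : a = false := by rw [heq] at h; exact h
    simp [ha]

theorem find_cons_true (v : PySem.Set (Int × Int)) (len : Int)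
    (data : PySem.Dict Int (List (Int × Int))) (ld n : Int) (rest : List (Int × Int))
    (r : List Int) (h : (dfs_indexator n len v).1 = true) :
    find_circle v len data ((ld, n) :: rest) r =
      find_circle v len data rest (r ++ [len - (dfs_indexator n len v).2]) := by
  conv_lhs => rw [find_circle]
  split
  next a b heq =>
    have ha : a = true := by rw [heq] at h; exact h
    have hb2 : (dfs_indexator n len v).2 = b := by rw [heq]
    rw [hb2]
    simp [ha]

theorem hc_loop_nil (data : PySem.Dict Int (List (Int × Int))) (best : Int) :
    hc_loop data [] best = best := by
  rw [hc_loop]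

theorem hc_loop_cons (data : PySem.Dict Int (List (Int × Int))) (first : Int)
    (seen : PySem.Dict Int Int) (depth : Int)
    (rest : List (Int × PySem.Dict Int Int × Int)) (best : Int) :
    hc_loop data ((first, seen, depth) :: rest) best =
      hc_loop data (hc_scan seen depth (data.getD first []) (rest, best)).1
        (hc_scan seen depth (data.getD first []) (rest, best)).2 := by
  rw [hc_loop]

-- max-fold algebra
theorem pv_mx1 (l : List Int) (x y : Int) :
    l.foldl (fun m v => max v m) (max x y) = max x (l.foldl (fun m v => max v m) y) := by
  induction l generalizing x y with
  | nil => rfl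
  | cons v t ih =>
    simp only [List.foldl_cons]
    rw [show max v (max x y) = max x (max v y) from max_left_comm v x y]
    exact ih x (max v y)

theorem maximum_cons (v : Int) (t : List Int) : maximum (v :: t) = max v (maximum t) := by
  unfold maximum
  simp only [List.foldl_cons]
  exact pv_mx1 t v 0

theorem maximum_nonneg (l : List Int) : 0 ≤ maximum l := by
  induction l with
  | nil => exact le_refl 0
  | cons v t ih =>
    rw [maximum_cons]
    exact le_trans ih (le_max_right _ _)

theorem maximum_append (a b : List Int) : maximum (a ++ b) = max (maximum a) (maximum b) := by
  induction a with
  | nil =>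
    simp only [List.nil_append]
    rw [show maximum [] = 0 from rfl]
    exact (max_eq_right (maximum_nonneg b)).symm
  | cons v t ih =>
    simp only [List.cons_append, maximum_cons, ih, max_assoc]

theorem pv_mx2 {α : Type} (l : List α) (g : α → Int) (x y : Int) :
    l.foldl (fun a e => max a (g e)) (max x y) = max x (l.foldl (fun a e => max a (g e)) y) := by
  induction l generalizing y with
  | nil => rfl
  | cons e t ih =>
    simp only [List.foldl_cons]
    rw [max_assoc]
    exact ih (max y (g e))

theorem pv_ff1 {α : Type} (l : List α) (c : α → Bool) (v : α → Int) (x y : Int) :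
    l.foldl (fun a e => if c e then max a (v e) else a) (max x y)
      = max x (l.foldl (fun a e => if c e then max a (v e) else a) y) := by
  induction l generalizing y with
  | nil => rfl
  | cons e t ih =>
    simp only [List.foldl_cons]
    cases hc : c e with
    | false => simp only [Bool.false_eq_true, if_false]; exact ih y
    | true =>
      simp only [if_true]
      rw [max_assoc]
      exact ih (max y (v e))

theorem pv_ff0 {α : Type} (l : List α) (c : α → Bool) (v : α → Int) (y : Int) (hy : 0 ≤ y) :
    0 ≤ l.foldl (fun a e => if c e then max a (v e) else a) y := by
  induction l generalizing y with
  | nil => exact hy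
  | cons e t ih =>
    simp only [List.foldl_cons]
    cases hc : c e with
    | false => simp only [Bool.false_eq_true, if_false]; exact ih y hy
    | true =>
      simp only [if_true]
      exact ih _ (le_trans hy (le_max_left _ _))

theorem pv_fold_max_reverse {α : Type} (l : List α) (g : α → Int) (x : Int) :
    (l.reverse).foldl (fun a e => max a (g e)) x = l.foldl (fun a e => max a (g e)) x := by
  induction l generalizing x with
  | nil => rfl
  | cons e t ih =>
    rw [List.reverse_cons, List.foldl_append]
    simp only [List.foldl_cons, List.foldl_nil]
    rw [ih]
    conv_rhs => rw [show max x (g e) = max (g e) x from max_comm x (g e), pv_mx2]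
    rw [max_comm]

theorem pv_if_max (a b : Int) : (if a < b then b else a) = max a b := by
  rcases lt_or_ge a b with h | h
  · rw [if_pos h, max_eq_right (le_of_lt h)]
  · rw [if_neg (not_lt.mpr h), max_eq_left h]

theorem hc_scan_snd (seen : PySem.Dict Int Int) (depth : Int) (neigh : List (Int × Int))
    (st : List (Int × PySem.Dict Int Int × Int)) (b : Int) :
    (hc_scan seen depth neigh (st, b)).2 =
      neigh.foldl (fun a e => if seen.contains e.2 then max a (depth - seen.getD e.2 0) else a) b := by
  unfold hc_scan
  rw [PySem.List.foldl_prod_mk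
    (f := fun s1 (e : Int × Int) => if seen.contains e.2 then s1
      else (e.1, seen.insert e.2 depth, depth + 1) :: s1)
    (g := fun b2 (e : Int × Int) => if seen.contains e.2 then
      (if b2 < depth - seen.getD e.2 0 then depth - seen.getD e.2 0 else b2) else b2)]
  show List.foldl _ b neigh = _
  congr 1
  funext b2 e
  rw [pv_if_max]

theorem pvM_append (data : PySem.Dict Int (List (Int × Int)))
    (a b : List (Int × PySem.Dict Int Int × Int)) :
    pvM data (a ++ b) = pvM data a + pvM data b := by
  simp [pvM]

-- B-side master lemma: hc_loop is the max over per-entry restarts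
theorem pv_LL (data : PySem.Dict Int (List (Int × Int))) :
    ∀ (N : Nat) (stack : List (Int × PySem.Dict Int Int × Int)) (b : Int),
      pvM data stack ≤ N → 0 ≤ b →
      hc_loop data stack b =
        stack.foldl (fun a e => max a (hc_loop data [e] 0)) b := by
  intro N
  induction N with
  | zero =>
    intro stack b hM _hb
    cases stack with
    | nil => rw [hc_loop_nil]; rfl
    | cons E rest =>
      exfalso
      have hpos : 0 < (pvL data + 1) ^ pvMu data E.2.1 := Nat.pow_pos (by omega)
      have : pvM data (E :: rest) = (pvL data + 1) ^ pvMu data E.2.1 +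
          pvM data rest := by simp [pvM]
      omega
  | succ N ih =>
    intro stack b hM hb
    cases stack with
    | nil => rw [hc_loop_nil]; rfl
    | cons E rest =>
      obtain ⟨first, seen, depth⟩ := E
      rw [hc_loop_cons, hc_scan_fst, hc_scan_snd]
      have hMlt : pvM data
          ((((data.getD first []).filter (fun e => !seen.contains e.2)).map
            (fun e => (e.1, seen.insert e.2 depth, depth + 1))).reverse ++ rest) <
          pvM data ((first, seen, depth) :: rest) := by
        have h := pvM_scan_lt data first seen depth rest b
        rwa [hc_scan_fst] at h
      have hMle : pvM data
          ((((data.getD first []).filter (fun e => !seen.contains e.2)).map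
            (fun e => (e.1, seen.insert e.2 depth, depth + 1))).reverse ++ rest) ≤ N := by
        omega
      have hMpush : pvM data
          ((((data.getD first []).filter (fun e => !seen.contains e.2)).map
            (fun e => (e.1, seen.insert e.2 depth, depth + 1))).reverse) ≤ N := by
        rw [pvM_append] at hMle
        omega
      have hF0 : 0 ≤ (data.getD first []).foldl
          (fun a e => if seen.contains e.2 then max a (depth - seen.getD e.2 0) else a) 0 :=
        pv_ff0 _ _ _ 0 le_rfl
      have hF : (data.getD first []).foldl
          (fun a e => if seen.contains e.2 then max a (depth - seen.getD e.2 0) else a) b =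
          max b ((data.getD first []).foldl
          (fun a e => if seen.contains e.2 then max a (depth - seen.getD e.2 0) else a) 0) := by
        conv_lhs => rw [show b = max b 0 from (max_eq_left hb).symm]
        exact pv_ff1 _ _ _ b 0
      have hFb : 0 ≤ (data.getD first []).foldl
          (fun a e => if seen.contains e.2 then max a (depth - seen.getD e.2 0) else a) b := by
        rw [hF]; exact le_trans hb (le_max_left _ _)
      rw [ih _ _ hMle hFb, List.foldl_append]
      have hsingle : hc_loop data [(first, seen, depth)] 0 =
          ((((data.getD first []).filter (fun e => !seen.contains e.2)).map
            (fun e => (e.1, seen.insert e.2 depth, depth + 1))).reverse).foldl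
            (fun a e => max a (hc_loop data [e] 0))
            ((data.getD first []).foldl
              (fun a e => if seen.contains e.2 then max a (depth - seen.getD e.2 0) else a) 0) := by
        rw [hc_loop_cons, hc_scan_fst, hc_scan_snd, List.append_nil]
        exact ih _ _ hMpush hF0
      simp only [List.foldl_cons]
      rw [hsingle, hF, pv_mx2]

theorem pv_LL' (data : PySem.Dict Int (List (Int × Int)))
    (stack : List (Int × PySem.Dict Int Int × Int)) (b : Int) (hb : 0 ≤ b) :
    hc_loop data stack b = stack.foldl (fun a e => max a (hc_loop data [e] 0)) b :=
  pv_LL data (pvM data stack) stack b le_rfl hb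

-- merging the found-fold and the child-fold back into one pass over the neighbors
theorem pv_merge {α : Type} (l : List α) (c : α → Bool) (v w : α → Int) (b : Int) :
    (l.filter (fun e => !c e)).foldl (fun a e => max a (w e))
      (l.foldl (fun a e => if c e then max a (v e) else a) b)
      = l.foldl (fun a e => if c e then max a (v e) else max a (w e)) b := by
  induction l generalizing b with
  | nil => rfl
  | cons e t ih =>
    cases hc : c e with
    | true =>
      simp only [List.filter_cons, hc, Bool.not_true, List.foldl_cons, if_true]
      exact ih (max b (v e))
    | false =>
      simp only [List.filter_cons, hc, Bool.not_false, List.foldl_cons, Bool.false_eq_true,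
        if_false]
      have hcomm : t.foldl (fun a e => if c e then max a (v e) else a) (max b (w e)) =
          max (t.foldl (fun a e => if c e then max a (v e) else a) b) (w e) := by
        rw [show max b (w e) = max (w e) b from max_comm _ _, pv_ff1, max_comm]
      rw [← ih (max b (w e)), hcomm]
      rw [if_pos trivial]
      simp only [List.foldl_cons]

-- one unfolding of hc_loop on a singleton stack, as a fold over the neighbor list
theorem pv_step (data : PySem.Dict Int (List (Int × Int))) (first : Int)
    (seen : PySem.Dict Int Int) (depth : Int) :
    hc_loop data [(first, seen, depth)] 0 =
      (data.getD first []).foldl (fun a e =>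
        if seen.contains e.2 then max a (depth - seen.getD e.2 0)
        else max a (hc_loop data [(e.1, seen.insert e.2 depth, depth + 1)] 0)) 0 := by
  rw [hc_loop_cons, hc_scan_fst, hc_scan_snd, List.append_nil]
  rw [pv_LL' data _ _ (pv_ff0 _ _ _ 0 le_rfl)]
  rw [pv_fold_max_reverse, List.foldl_map]
  exact pv_merge (data.getD first []) (fun e => seen.contains e.2)
    (fun e => depth - seen.getD e.2 0)
    (fun e => hc_loop data [(e.1, seen.insert e.2 depth, depth + 1)] 0) 0

-- A-side: the record argument is only appended to
theorem find_append_aux (v : PySem.Set (Int × Int)) (len : Int)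
    (data : PySem.Dict Int (List (Int × Int))) (p : List (Int × Int)) (rec : List Int) :
    ∀ r, find_circle v len data p r = r ++ find_circle v len data p [] := by
  induction v, len, p, rec using find_circle.induct with
  | data => exact data
  | case1 v len r =>
    intro r'
    rw [find_nil, find_nil, List.append_nil]
  | case2 v len r ld n rest gen hEq ih_child ih_rest =>
    intro r'
    have hfalse : (dfs_indexator n len v).1 = false := by rw [hEq]
    rw [find_cons_false _ _ _ _ _ _ _ hfalse, find_cons_false _ _ _ _ _ _ _ hfalse]
    rw [ih_rest (find_circle (PySem.Set.union v [(n, len)]) (len + 1) data (data.getD ld []) r')]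
    rw [ih_rest (find_circle (PySem.Set.union v [(n, len)]) (len + 1) data (data.getD ld []) [])]
    rw [ih_child r']
    simp [List.append_assoc]
  | case3 v len r ld n rest num_in_set gen hEq hb ih_rest =>
    intro r'
    have htrue : (dfs_indexator n len v).1 = true := by
      rw [hEq]; simpa using hb
    rw [find_cons_true _ _ _ _ _ _ _ htrue, find_cons_true _ _ _ _ _ _ _ htrue]
    rw [ih_rest (r' ++ [len - (dfs_indexator n len v).2])]
    rw [ih_rest ([] ++ [len - (dfs_indexator n len v).2])]
    simp [List.append_assoc]

theorem find_append (v : PySem.Set (Int × Int)) (len : Int)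
    (data : PySem.Dict Int (List (Int × Int))) (p : List (Int × Int)) (r : List Int) :
    find_circle v len data p r = r ++ find_circle v len data p [] :=
  find_append_aux v len data p [] r

-- the visited set of A is exactly the items list of B's seen dictionary
theorem pv_union_insert (seen : PySem.Dict Int Int) (n len : Int)
    (hc : seen.contains n = false) :
    PySem.Set.union seen.items [(n, len)] = (seen.insert n len).items := by
  rw [PySem.Dict.items_insert_of_not_contains seen len hc]
  simp only [PySem.Set.union, PySem.Set.update, List.foldl_cons, List.foldl_nil, PySem.Set.add]
  rw [if_neg]
  intro hcont
  have hmem : (n, len) ∈ seen.items := List.contains_iff_mem.mp hcont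
  have : seen.contains n = true := by
    rw [PySem.Dict.contains_iff_mem_keys]
    simp only [PySem.Dict.keys, List.mem_map]
    exact ⟨(n, len), hmem, rfl⟩
  rw [this] at hc; cases hc

theorem pv_fold_none (l : List Int) (q : Int → Bool) (init : Bool × Int)
    (h : ∀ x ∈ l, q x = false) :
    l.foldl (fun st i => if q i then (true, i) else st) init = init := by
  induction l generalizing init with
  | nil => rfl
  | cons x t ih =>
    simp only [List.foldl_cons]
    rw [if_neg (by rw [h x (by simp)]; simp)]
    exact ih init (fun y hy => h y (by simp [hy]))

-- the dfs_indexator scan against seen.items is exactly a dictionary lookup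
theorem dfs_of_items (seen : PySem.Dict Int Int) (len n : Int)
    (hnd : seen.keys.Nodup) (hbd : ∀ p ∈ seen.items, 0 ≤ p.2 ∧ p.2 < len) :
    dfs_indexator n len seen.items =
      (seen.contains n, if seen.contains n then seen.getD n 0 else 0) := by
  cases hc : seen.contains n with
  | false =>
    have hno : ∀ i : Int, ((n, i) : Int × Int) ∉ seen.items := by
      intro i hmem
      have : seen.contains n = true := by
        rw [PySem.Dict.contains_iff_mem_keys]
        simp only [PySem.Dict.keys, List.mem_map]
        exact ⟨(n, i), hmem, rfl⟩
      rw [this] at hc; cases hc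
    unfold dfs_indexator
    rw [pv_fold_none _ _ _ ?_]
    · simp
    · intro x _
      cases hcx : PySem.Set.contains seen.items (n, x) with
      | false => rfl
      | true => exact absurd (List.contains_iff_mem.mp hcx) (hno x)
  | true =>
    have hsome : (seen.get? n).isSome := by
      rw [← PySem.Dict.contains_eq_isSome_get?]; exact hc
    obtain ⟨d, hget⟩ := Option.isSome_iff_exists.mp hsome
    have hmemd : (n, d) ∈ seen.items := PySem.Dict.mem_items_of_get?_eq_some seen hget
    have hbdd := hbd _ hmemd
    have hgetD : seen.getD n 0 = d := PySem.Dict.getD_of_get?_eq_some seen 0 hget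
    have huniq : ∀ i : Int, ((n, i) : Int × Int) ∈ seen.items → i = d := by
      intro i hi
      have := (PySem.Dict.get?_eq_some_iff_mem_items seen n i hnd).mpr hi
      rw [hget] at this
      exact (Option.some.injEq _ _ ▸ this).symm
    unfold dfs_indexator
    rw [PySem.List.pyRange_one_append 0 d (len + 1) (by omega) (by omega), List.foldl_append]
    have h1 : List.foldl
        (fun st i => if PySem.Set.contains seen.items (n, i) = true then (true, i) else st)
        (false, 0) (PySem.List.pyRange 0 d) = (false, 0) := by
      apply pv_fold_none
      intro x hx
      rw [PySem.List.mem_pyRange_one] at hx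
      cases hcx : PySem.Set.contains seen.items (n, x) with
      | false => rfl
      | true =>
        have := huniq x (List.contains_iff_mem.mp hcx)
        omega
    rw [h1]
    rw [PySem.List.pyRange_one_cons (by omega : d < len + 1)]
    simp only [List.foldl_cons]
    rw [if_pos (show PySem.Set.contains seen.items (n, d) = true from
      List.contains_iff_mem.mpr hmemd)]
    have h2 : List.foldl
        (fun st i => if PySem.Set.contains seen.items (n, i) = true then (true, i) else st)
        (true, d) (PySem.List.pyRange (d + 1) (len + 1)) = (true, d) := by
      apply pv_fold_none
      intro x hx
      rw [PySem.List.mem_pyRange_one] at hx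
      cases hcx : PySem.Set.contains seen.items (n, x) with
      | false => rfl
      | true =>
        have := huniq x (List.contains_iff_mem.mp hcx)
        omega
    rw [h2]
    simp [hgetD]

-- the two fold-step shapes used on the A side
theorem pv_step_as_max (seen : PySem.Dict Int Int) (len : Int)
    (data : PySem.Dict Int (List (Int × Int))) :
    (fun (a : Int) (e : Int × Int) =>
      if seen.contains e.2 then max a (len - seen.getD e.2 0)
      else max a (hc_loop data [(e.1, seen.insert e.2 len, len + 1)] 0)) =
    (fun (a : Int) (e : Int × Int) => max a
      (if seen.contains e.2 then (len - seen.getD e.2 0)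
       else hc_loop data [(e.1, seen.insert e.2 len, len + 1)] 0)) := by
  funext a e
  by_cases h : seen.contains e.2 <;> simp [h]

-- KEY: A's recursive search from a related state equals B's per-neighbor fold
theorem pv_key (visited : PySem.Set (Int × Int)) (len : Int)
    (data : PySem.Dict Int (List (Int × Int))) (pending : List (Int × Int)) (rec : List Int) :
    ∀ seen : PySem.Dict Int Int, visited = seen.items → seen.keys.Nodup →
      (∀ p ∈ seen.items, 0 ≤ p.2 ∧ p.2 < len) → 0 ≤ len →
      maximum (find_circle visited len data pending []) =
        pending.foldl (fun a e =>
          if seen.contains e.2 then max a (len - seen.getD e.2 0)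
          else max a (hc_loop data [(e.1, seen.insert e.2 len, len + 1)] 0)) 0 := by
  induction visited, len, pending, rec using find_circle.induct with
  | data => exact data
  | case1 v len r =>
    intro seen _hv _hnd _hbd _hlen
    rw [find_nil]
    rfl
  | case2 v len r ld n rest gen hEq ih_child ih_rest =>
    intro seen hv hnd hbd hlen
    subst hv
    have hdfs := dfs_of_items seen len n hnd hbd
    have hcf : seen.contains n = false := by
      have h2 := hdfs
      rw [hEq] at h2
      have := congrArg Prod.fst h2
      simp only at this
      exact this.symm
    have hfalse : (dfs_indexator n len seen.items).1 = false := by rw [hEq]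
    rw [find_cons_false _ _ _ _ _ _ _ hfalse]
    rw [find_append]
    rw [maximum_append]
    have hbounds' : ∀ p ∈ (seen.insert n len).items, 0 ≤ p.2 ∧ p.2 < len + 1 := by
      intro p hp
      rw [PySem.Dict.items_insert_of_not_contains seen len hcf] at hp
      rcases List.mem_append.mp hp with h | h
      · have := hbd p h; omega
      · simp only [List.mem_singleton] at h
        subst h; simp; omega
    have hchild := ih_child (seen.insert n len) (pv_union_insert seen n len hcf)
      (PySem.Dict.nodup_keys_insert seen n len hnd) hbounds' (by omega)
    have hchild2 : maximum (find_circle (PySem.Set.union seen.items [(n, len)]) (len + 1) data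
        (data.getD ld []) []) = hc_loop data [(ld, seen.insert n len, len + 1)] 0 := by
      rw [hchild, ← pv_step]
    have hrest := ih_rest seen rfl hnd hbd hlen
    rw [hchild2, hrest]
    simp only [List.foldl_cons]
    rw [if_neg (by rw [hcf]; simp)]
    rw [pv_step_as_max]
    rw [show max (0 : Int) (hc_loop data [(ld, seen.insert n len, len + 1)] 0) =
        max (hc_loop data [(ld, seen.insert n len, len + 1)] 0) 0 from max_comm _ _]
    rw [pv_mx2]
  | case3 v len r ld n rest num_in_set gen hEq hb ih_rest =>
    intro seen hv hnd hbd hlen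
    subst hv
    have hdfs := dfs_of_items seen len n hnd hbd
    have hct : seen.contains n = true := by
      have h2 := hdfs
      rw [hEq] at h2
      have := congrArg Prod.fst h2
      simp only at this
      rw [← this]
      simpa using hb
    have htrue : (dfs_indexator n len seen.items).1 = true := by
      rw [hEq]; simpa using hb
    have hgen : (dfs_indexator n len seen.items).2 = seen.getD n 0 := by
      rw [hdfs]; simp [hct]
    rw [find_cons_true _ _ _ _ _ _ _ htrue, hgen, List.nil_append]
    rw [find_append]
    rw [maximum_append]
    have hrest := ih_rest seen rfl hnd hbd hlen
    rw [hrest]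
    simp only [List.foldl_cons]
    rw [if_pos (by rw [hct])]
    rw [pv_step_as_max]
    rw [show max (0 : Int) (len - seen.getD n 0) = max (len - seen.getD n 0) 0 from max_comm _ _]
    rw [pv_mx2]
    rw [show maximum [len - seen.getD n 0] = max (len - seen.getD n 0) 0 from rfl]
    rw [max_assoc]
    congr 1
    exact max_eq_right (PySem.List.le_foldl_max_int rest _ 0).1

-- A-side assembly over the keys
theorem pv_A_fold (data : PySem.Dict Int (List (Int × Int))) (ks : List Int) (r : List Int) :
    maximum (ks.foldl (fun rec k => find_circle PySem.Set.empty 0 data (data.getD k []) rec) r)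
      = ks.foldl (fun a k =>
          max a (maximum (find_circle PySem.Set.empty 0 data (data.getD k []) []))) (maximum r) := by
  induction ks generalizing r with
  | nil => rfl
  | cons k t ih =>
    simp only [List.foldl_cons]
    rw [ih, find_append, maximum_append]

theorem pv_per_key (data : PySem.Dict Int (List (Int × Int))) (k : Int) :
    maximum (find_circle PySem.Set.empty 0 data (data.getD k []) []) =
      hc_loop data [(k, PySem.Dict.empty, 0)] 0 := by
  have h := pv_key PySem.Set.empty 0 data (data.getD k []) []
    PySem.Dict.empty rfl PySem.Dict.nodup_keys_empty (by intro p hp; cases hp) le_rfl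
  rw [h, ← pv_step]

theorem pv_final (data : PySem.Dict Int (List (Int × Int))) :
    maximum (data.keys.foldl
        (fun rec key => find_circle PySem.Set.empty 0 data (data.getD key []) rec) []) =
      hc_loop data
        ((data.keys.map (fun k => (k, (PySem.Dict.empty : PySem.Dict Int Int), (0 : Int)))).reverse)
        0 := by
  rw [pv_A_fold]
  rw [pv_LL' data _ 0 le_rfl]
  rw [pv_fold_max_reverse, List.foldl_map]
  rw [show maximum [] = 0 from rfl]
  apply PySem.List.foldl_congr_mem
  intro a k _
  rw [pv_per_key]

-- the data dictionaries built by A and B coincide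
theorem gfl_eq (n fd : Int) (h : 0 < n) : gfl_loop n fd = hc_msd n := by
  induction n, fd using gfl_loop.induct with
  | case1 m fd hm ih =>
    rw [gfl_loop]
    rw [dif_pos hm]
    by_cases h16 : 16 ≤ m
    · have hq : 0 < PySem.Int.floordiv m 16 := by
        rw [PySem.Int.floordiv_eq_ediv_of_pos (by norm_num : (0:Int) < 16)]
        omega
      rw [ih hq]
      conv_rhs => rw [hc_msd]
      rw [dif_pos h16]
    · have hq : PySem.Int.floordiv m 16 = 0 := by
        rw [PySem.Int.floordiv_eq_ediv_of_pos (by norm_num : (0:Int) < 16)]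
        omega
      rw [hq, gfl_loop]
      rw [dif_neg (by omega)]
      conv_rhs => rw [hc_msd]
      rw [dif_neg h16]
      rw [PySem.Int.mod_eq_emod_of_pos (by norm_num : (0:Int) < 16)]
      omega
  | case2 m fd hm => omega

theorem hc_msd_nonneg (n : Int) (h : 0 ≤ n) : 0 ≤ hc_msd n := by
  induction n using hc_msd.induct with
  | case1 m hm ih =>
    rw [hc_msd, dif_pos hm]
    apply ih
    rw [PySem.Int.floordiv_eq_ediv_of_pos (by norm_num : (0:Int) < 16)]
    omega
  | case2 m hm =>
    rw [hc_msd, dif_neg hm]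
    exact h

theorem pv_digits (n : Int) : get_first_last_dig n = ((hc_digits n).1, (hc_digits n).2, n) := by
  show (if gfl_loop n (-1) = -1 then PySem.Int.mod n 16 else gfl_loop n (-1),
        PySem.Int.mod n 16, n) = ((hc_digits n).1, (hc_digits n).2, n)
  unfold hc_digits
  by_cases hn : n ≤ 0
  · have hg : gfl_loop n (-1) = -1 := by
      rw [gfl_loop, dif_neg (by omega)]
    simp [hg, hn]
  · have h0 : 0 < n := by omega
    have hg : gfl_loop n (-1) = hc_msd n := gfl_eq n (-1) h0
    have hge : 0 ≤ hc_msd n := hc_msd_nonneg n (by omega)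
    rw [hg]
    rw [if_neg (show ¬ hc_msd n = -1 by omega)]
    simp [hn]

theorem build_eq (numbers : List Int) :
    numbers.foldl (fun data number =>
      let t := get_first_last_dig number
      if (data.getD t.1 []).isEmpty then data.insert t.1 [(t.2.1, t.2.2)]
      else data.insert t.1 (data.getD t.1 [] ++ [(t.2.1, t.2.2)]))
      PySem.Dict.empty = hc_build numbers := by
  unfold hc_build
  apply PySem.List.foldl_congr_mem
  intro d n _
  show (if (d.getD (get_first_last_dig n).1 []).isEmpty then
          d.insert (get_first_last_dig n).1
            [((get_first_last_dig n).2.1, (get_first_last_dig n).2.2)]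
        else d.insert (get_first_last_dig n).1
          (d.getD (get_first_last_dig n).1 [] ++
            [((get_first_last_dig n).2.1, (get_first_last_dig n).2.2)]))
      = d.modify (hc_digits n).1 [] (fun l => l ++ [((hc_digits n).2, n)])
  rw [pv_digits n]
  dsimp only
  simp only [PySem.Dict.modify]
  by_cases h : (d.getD (hc_digits n).1 []).isEmpty
  · rw [if_pos h]
    have he : d.getD (hc_digits n).1 [] = [] := List.isEmpty_iff.mp h
    rw [he]
    rfl
  · rw [if_neg h]

theorem hex_circle_main (numbers : List Int) : hex_circle numbers = hex_circle_alt numbers := by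
  unfold hex_circle hex_circle_alt
  rw [build_eq]
  exact pv_final (hc_build numbers)

-- ===== VERDICT (by name: the statement is the Claim_ definition above) =====
theorem hex_circle_spec : Claim_equal_hex_circle := by
  intro numbers _dom
  unfold Spec_hex_circle
  exact hex_circle_main numbers
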